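-- pv_equiv track=rewrite | github.com/malerinc/slapstack | 1_environment/slapstack/slapstack/use_case.py | get_nowait_initial_skus
-- ===== SOURCE A (Python) =====
-- from collections import defaultdict
-- from typing import Tuple, Dict, List, Set, Mapping
--
-- def get_nowait_initial_skus(
--         orders: List[Tuple[str, int, int, int, int]]) -> Dict[int, int]:
--     """
--     Calculates the minimum number of initial skus in the warehouse such that all
--     arriving orders can be directly serviced, provided an agv is free. This
--     means that retrieval orders will never have to wait for future deliveries.
--
--     Note that this could result in more skus than available storage spaces.
--
--     :param orders: The orders that will be fed into the simulation.
--     :return: The dictionary mapping SKU to the amounts present at the beginning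
--         of the simulation.
--     """
--     min_skus = defaultdict(int)
--     sku_counts = defaultdict(int)
--     for order in orders:
--         order_type, sku = order[0], order[1]
--         sku_counts[sku] += -1 if order_type == 'retrieval' else 1
--         if sku_counts[sku] < -min_skus[sku]:
--             min_skus[sku] = -sku_counts[sku]
--     return min_skus
-- ===== SOURCE B (Python) =====
-- from collections import defaultdict
--
--
-- def get_nowait_initial_skus(orders):
--     # One pass to group each SKU's +-1 deltas in first-appearance order,
--     # then one reduction per SKU: minimum prefix sum -> max(0, -min_prefix).
--     pairs = [(order[1], -1 if order[0] == 'retrieval' else 1) for order in orders]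
--     groups = defaultdict(list)
--     for sku, delta in pairs:
--         groups[sku].append(delta)
--     result = defaultdict(int)
--     for sku, deltas in groups.items():
--         running = 0
--         lowest = 0
--         for d in deltas:
--             running += d
--             if running < lowest:
--                 lowest = running
--         result[sku] = -lowest
--     return result
-- ===== Notes on version B (the rewrite author's own statement) =====
-- stated objective: alternative
-- what changed: A does a single interleaved scan updating two defaultdicts (running count and min per SKU) per order; B first groups each SKU's +-1 deltas into a dict in one pass, then computes each SKU's answer as the negated minimum prefix sum of its own delta list, preserving the 0 entries for every SKU seen and first-appearance key order.
import Mathlib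
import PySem

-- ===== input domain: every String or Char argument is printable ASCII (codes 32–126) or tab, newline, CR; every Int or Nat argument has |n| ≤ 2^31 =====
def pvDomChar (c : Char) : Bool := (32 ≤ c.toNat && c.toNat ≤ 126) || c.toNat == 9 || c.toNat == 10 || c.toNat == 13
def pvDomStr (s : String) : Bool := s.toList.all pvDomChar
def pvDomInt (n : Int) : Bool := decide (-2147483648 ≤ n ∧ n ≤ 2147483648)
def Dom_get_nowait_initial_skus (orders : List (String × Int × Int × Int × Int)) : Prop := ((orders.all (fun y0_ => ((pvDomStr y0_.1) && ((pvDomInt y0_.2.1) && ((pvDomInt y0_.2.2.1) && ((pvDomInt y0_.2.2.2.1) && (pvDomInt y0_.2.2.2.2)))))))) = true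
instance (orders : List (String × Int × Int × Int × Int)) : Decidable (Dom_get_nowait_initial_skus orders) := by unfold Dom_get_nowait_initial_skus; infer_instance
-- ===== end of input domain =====

-- B groups each SKU's ±1 deltas in one pass and then takes max(0, -min prefix sum) per SKU
-- (alternative decomposition, same cost; return value only — both return a fresh dict).

-- ===== PORT A =====
-- running pair of defaultdicts (min_skus, sku_counts); a defaultdict READ min_skus[sku]
-- inserts the key with 0 when missing, modelled by setdefault.
def get_nowait_initial_skus (orders : List (String × Int × Int × Int × Int)) : List (Int × Int) :=
  (orders.foldl
    (fun (st : PySem.Dict Int Int × PySem.Dict Int Int) order =>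
      let order_type := order.1
      let sku := order.2.1
      let sku_counts := st.2.modify sku 0 (· + (if order_type == "retrieval" then (-1 : Int) else 1))
      let min_skus := st.1.setdefault sku 0
      if sku_counts.getD sku 0 < -(min_skus.getD sku 0) then
        (min_skus.insert sku (-(sku_counts.getD sku 0)), sku_counts)
      else (min_skus, sku_counts))
    (PySem.Dict.empty, PySem.Dict.empty)).1.items

-- ===== PORT B =====
-- the inner 'running/lowest' loop of Source B
def altLowest (running lowest : Int) : List Int → Int
  | [] => lowest
  | d :: ds =>
    let r := running + d
    altLowest r (if r < lowest then r else lowest) ds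

def get_nowait_initial_skus_alt (orders : List (String × Int × Int × Int × Int)) : List (Int × Int) :=
  let pairs := orders.map (fun order => (order.2.1, if order.1 == "retrieval" then (-1 : Int) else 1))
  let groups := pairs.foldl (fun (d : PySem.Dict Int (List Int)) p => d.modify p.1 [] (· ++ [p.2])) PySem.Dict.empty
  (groups.items.foldl (fun (r : PySem.Dict Int Int) p => r.insert p.1 (-(altLowest 0 0 p.2))) PySem.Dict.empty).items

-- ===== PRECONDITION & SPEC =====
def Spec_get_nowait_initial_skus (orders : List (String × Int × Int × Int × Int)) (out : List (Int × Int)) : Prop := out = get_nowait_initial_skus_alt orders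
instance (orders : List (String × Int × Int × Int × Int)) (out : List (Int × Int)) : Decidable (Spec_get_nowait_initial_skus orders out) := by unfold Spec_get_nowait_initial_skus; infer_instance

-- ===== CLAIM (what is proved, stated in full; the proofs are below) =====
def Claim_equal_get_nowait_initial_skus : Prop := ∀ (orders : List (String × Int × Int × Int × Int)), Dom_get_nowait_initial_skus orders → Spec_get_nowait_initial_skus orders (get_nowait_initial_skus orders)

-- ===== LEMMAS AND PROOFS =====

def pvKey (o : String × Int × Int × Int × Int) : Int := o.2.1
def pvDelta (o : String × Int × Int × Int × Int) : Int := if o.1 == "retrieval" then -1 else 1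

-- the delta sequence of SKU k, in order
def pvDl (k : Int) (l : List (String × Int × Int × Int × Int)) : List Int :=
  ((l.map (fun o => (pvKey o, pvDelta o))).filter (fun p => p.1 == k)).map (·.2)

-- A's loop body as a named step function (definitionally A's fold step)
def pvStepA (st : PySem.Dict Int Int × PySem.Dict Int Int) (order : String × Int × Int × Int × Int) :
    PySem.Dict Int Int × PySem.Dict Int Int :=
  if (st.2.modify order.2.1 0 (· + (if order.1 == "retrieval" then (-1 : Int) else 1))).getD order.2.1 0
      < -((st.1.setdefault order.2.1 0).getD order.2.1 0) then
    ((st.1.setdefault order.2.1 0).insert order.2.1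
        (-((st.2.modify order.2.1 0 (· + (if order.1 == "retrieval" then (-1 : Int) else 1))).getD order.2.1 0)),
      st.2.modify order.2.1 0 (· + (if order.1 == "retrieval" then (-1 : Int) else 1)))
  else (st.1.setdefault order.2.1 0,
      st.2.modify order.2.1 0 (· + (if order.1 == "retrieval" then (-1 : Int) else 1)))

lemma pvA_eq (orders : List (String × Int × Int × Int × Int)) :
    get_nowait_initial_skus orders
      = (orders.foldl pvStepA (PySem.Dict.empty, PySem.Dict.empty)).1.items := rfl

lemma pvDl_append (k : Int) (l : List (String × Int × Int × Int × Int)) (o : String × Int × Int × Int × Int) :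
    pvDl k (l ++ [o]) = pvDl k l ++ (if pvKey o == k then [pvDelta o] else []) := by
  simp only [pvDl, List.map_append, List.filter_append, List.map_cons, List.map_nil,
    List.filter_cons, List.filter_nil]
  split <;> simp

lemma altLowest_append (ds : List Int) (r low d : Int) :
    altLowest r low (ds ++ [d])
      = (if r + ds.sum + d < altLowest r low ds then r + ds.sum + d else altLowest r low ds) := by
  induction ds generalizing r low with
  | nil => simp [altLowest]
  | cons d' ds ih =>
    simp only [List.cons_append, altLowest, List.sum_cons]
    rw [ih]
    have : r + d' + ds.sum + d = r + (d' + ds.sum) + d := by ring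
    rw [this]

lemma pvStepA_eq (st : PySem.Dict Int Int × PySem.Dict Int Int) (o : String × Int × Int × Int × Int) :
    pvStepA st o =
      if (st.2.modify o.2.1 0 (· + pvDelta o)).getD o.2.1 0
          < -((st.1.setdefault o.2.1 0).getD o.2.1 0) then
        ((st.1.setdefault o.2.1 0).insert o.2.1
            (-((st.2.modify o.2.1 0 (· + pvDelta o)).getD o.2.1 0)),
          st.2.modify o.2.1 0 (· + pvDelta o))
      else (st.1.setdefault o.2.1 0, st.2.modify o.2.1 0 (· + pvDelta o)) := rfl

lemma pvInvA (l : List (String × Int × Int × Int × Int)) :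
    (∀ k, (l.foldl pvStepA (PySem.Dict.empty, PySem.Dict.empty)).2.getD k 0 = (pvDl k l).sum) ∧
    (∀ k, (l.foldl pvStepA (PySem.Dict.empty, PySem.Dict.empty)).1.getD k 0 = -(altLowest 0 0 (pvDl k l))) ∧
    (l.foldl pvStepA (PySem.Dict.empty, PySem.Dict.empty)).1.keys = PySem.Set.ofList (l.map pvKey) := by
  induction l using List.reverseRecOn with
  | nil =>
    refine ⟨?_, ?_, ?_⟩ <;>
      simp [pvDl, altLowest, PySem.Dict.getD_empty, PySem.Dict.keys_empty, PySem.Set.ofList_nil]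
  | append_singleton l o ih =>
    obtain ⟨ihc, ihm, ihk⟩ := ih
    rw [List.foldl_append]
    simp only [List.foldl_cons, List.foldl_nil]
    set st := l.foldl pvStepA (PySem.Dict.empty, PySem.Dict.empty) with hst
    have hsd_getD : ∀ k, (st.1.setdefault o.2.1 0).getD k 0 = st.1.getD k 0 := by
      intro k
      by_cases hc : st.1.contains o.2.1 = true
      · rw [PySem.Dict.setdefault_of_contains _ _ hc]
      · rw [PySem.Dict.setdefault_of_not_contains _ _ (by simpa using hc)]
        rw [PySem.Dict.getD_insert]
        split
        · rename_i h; subst h; rw [PySem.Dict.getD_of_not_contains _ _ (by simpa using hc)]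
        · rfl
    have hsd_keys : (st.1.setdefault o.2.1 0).keys = PySem.Set.add st.1.keys o.2.1 := by
      by_cases hc : st.1.contains o.2.1 = true
      · rw [PySem.Dict.setdefault_of_contains _ _ hc,
          PySem.Set.add_of_mem ((PySem.Dict.contains_iff_mem_keys _ _).mp hc)]
      · rw [PySem.Dict.setdefault_of_not_contains _ _ (by simpa using hc),
          PySem.Dict.keys_insert_of_not_contains _ _ (by simpa using hc),
          PySem.Set.add_of_not_mem (fun hm => hc ((PySem.Dict.contains_iff_mem_keys _ _).mpr hm))]
    have hsd_contains : (st.1.setdefault o.2.1 0).contains o.2.1 = true := by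
      rw [PySem.Dict.contains_iff_mem_keys, hsd_keys]
      exact (PySem.Set.mem_add _ _ _).mpr (Or.inr rfl)
    have hcountsD : ∀ k, (st.2.modify o.2.1 0 (· + pvDelta o)).getD k 0
        = (pvDl k (l ++ [o])).sum := by
      intro k
      rw [PySem.Dict.getD_modify, pvDl_append]
      by_cases hk : k = o.2.1
      · subst hk
        simp [pvKey, ihc]
      · have : (pvKey o == k) = false := by simp [pvKey]; omega
        simp [hk, this, ihc]
    by_cases hcond : (st.2.modify o.2.1 0 (· + pvDelta o)).getD o.2.1 0
        < -((st.1.setdefault o.2.1 0).getD o.2.1 0)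
    all_goals refine ⟨?_, ?_, ?_⟩
    -- counts (both branches)
    case pos.refine_1 | neg.refine_1 =>
      intro k
      first
        | rw [pvStepA_eq, if_pos hcond]; exact hcountsD k
        | rw [pvStepA_eq, if_neg hcond]; exact hcountsD k
    -- min values
    case pos.refine_2 | neg.refine_2 =>
      intro k
      by_cases hk : k = o.2.1
      · subst hk
        have hdl : pvDl o.2.1 (l ++ [o]) = pvDl o.2.1 l ++ [pvDelta o] := by
          rw [pvDl_append]; simp [pvKey]
        have hsum : (pvDl o.2.1 (l ++ [o])).sum = (pvDl o.2.1 l).sum + pvDelta o := by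
          rw [hdl]; simp
        have hlt := hcond
        rw [hcountsD o.2.1, hsum, hsd_getD, ihm] at hlt
        rw [hdl, altLowest_append]
        first
          | (rw [pvStepA_eq, if_pos hcond]
             rw [PySem.Dict.getD_insert, if_pos rfl, hcountsD o.2.1, hsum]
             rw [if_pos (by omega : (0:Int) + (pvDl o.2.1 l).sum + pvDelta o < altLowest 0 0 (pvDl o.2.1 l))]
             ring)
          | (rw [pvStepA_eq, if_neg hcond]
             rw [hsd_getD, ihm]
             rw [if_neg (by omega : ¬ ((0:Int) + (pvDl o.2.1 l).sum + pvDelta o < altLowest 0 0 (pvDl o.2.1 l)))])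
      · have hdl : pvDl k (l ++ [o]) = pvDl k l := by
          rw [pvDl_append]
          have : (pvKey o == k) = false := by simp [pvKey]; omega
          simp [this]
        rw [hdl]
        first
          | (rw [pvStepA_eq, if_pos hcond, PySem.Dict.getD_insert, if_neg hk, hsd_getD, ihm])
          | (rw [pvStepA_eq, if_neg hcond, hsd_getD, ihm])
    -- keys
    case pos.refine_3 | neg.refine_3 =>
      first
        | rw [pvStepA_eq, if_pos hcond,
            PySem.Dict.keys_insert_of_contains _ _ hsd_contains, hsd_keys, ihk]
        | rw [pvStepA_eq, if_neg hcond, hsd_keys, ihk]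
      all_goals simp [PySem.Set.ofList_append_singleton, pvKey]

lemma pvB_items (orders : List (String × Int × Int × Int × Int)) :
    get_nowait_initial_skus_alt orders
      = (PySem.Set.ofList (orders.map pvKey)).map (fun k => (k, -(altLowest 0 0 (pvDl k orders)))) := by
  unfold get_nowait_initial_skus_alt
  have hpairs : (orders.map (fun order => (order.2.1, if order.1 == "retrieval" then (-1 : Int) else 1)))
      = orders.map (fun o => (pvKey o, pvDelta o)) := by simp [pvKey, pvDelta]
  simp only [hpairs]
  set pairs := orders.map (fun o => (pvKey o, pvDelta o)) with hp
  set groups := pairs.foldl (fun (d : PySem.Dict Int (List Int)) p => d.modify p.1 [] (· ++ [p.2])) PySem.Dict.empty with hg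
  have hkeys : groups.keys = PySem.Set.ofList (orders.map pvKey) := by
    rw [hg, PySem.Dict.keys_foldl_modify_key]
    simp only [PySem.Dict.keys_empty, PySem.Set.update_nil_left, hp, List.map_map, Function.comp_def]
  have hnd : groups.keys.Nodup := by
    rw [hg]; exact PySem.Dict.nodup_keys_foldl_modify_key _ _ _ _ _ PySem.Dict.nodup_keys_empty
  have hgetD : ∀ k, groups.getD k [] = pvDl k orders := by
    intro k
    rw [hg, PySem.Dict.getD_foldl_modify_append]
    simp [pvDl, PySem.Dict.getD_empty, hp]
  have hfresh : ∀ a ∈ groups.items, (PySem.Dict.empty : PySem.Dict Int Int).contains a.1 = false := by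
    intro a _; exact PySem.Dict.contains_empty _
  have hmapnd : (groups.items.map (fun p => p.1)).Nodup := hnd
  rw [PySem.Dict.items_foldl_insert_fresh groups.items (fun p => p.1) (fun p => -(altLowest 0 0 p.2)) PySem.Dict.empty hfresh hmapnd]
  rw [PySem.Dict.items_eq_map_keys groups hnd []]
  simp only [List.map_map]
  rw [hkeys]
  have he : (PySem.Dict.empty : PySem.Dict Int Int).items = [] := rfl
  rw [he, List.nil_append]
  exact List.map_congr_left (fun k hk => by simp [hgetD])

-- ===== VERDICT (by name: the statement is the Claim_ definition above) =====
theorem get_nowait_initial_skus_spec : Claim_equal_get_nowait_initial_skus := by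
  intro orders _
  unfold Spec_get_nowait_initial_skus
  obtain ⟨_, ihm, ihk⟩ := pvInvA orders
  have hnd : (orders.foldl pvStepA (PySem.Dict.empty, PySem.Dict.empty)).1.keys.Nodup := by
    rw [ihk]; exact PySem.Set.nodup_ofList _
  rw [pvA_eq, pvB_items, PySem.Dict.items_eq_map_keys _ hnd 0, ihk]
  exact List.map_congr_left (fun k hk => by rw [ihm k])
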